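-- pv_equiv track=rewrite | github.com/lflrocha/v2.mpf.migracao | assets.py | pick_scale
-- ===== SOURCE A (Python) =====
-- SCALES = [
--     ("large", 768),
--     ("preview", 400),
--     ("mini", 200),
--     ("thumb", 128),
--     ("tile", 64),
--     ("icon", 32),
--     ("listing", 16),
-- ]
--
-- def pick_scale(width: int | None, height: int | None) -> str:
--     """
--     Escolhe o scale mais “adequado” pelo maior lado (max(width, height)).
--     Regra: pega o MAIOR scale cujo limite seja <= maior lado.
--     Se não conseguir medir, cai em preview.
--     """
--     if not width or not height:
--         return "preview"
--     m = max(width, height)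
--     for name, limit in SCALES:
--         if m >= limit:
--             return name
--     return "listing"
-- ===== SOURCE B (Python) =====
-- LIMITS = [16, 32, 64, 128, 200, 400, 768]
-- NAMES = ["listing", "icon", "tile", "thumb", "mini", "preview", "large"]
--
-- def pick_scale(width, height):
--     if not width or not height:
--         return "preview"
--     m = max(width, height)
--     lo, hi = 0, len(LIMITS)
--     while lo < hi:
--         mid = (lo + hi) // 2
--         if m < LIMITS[mid]:
--             hi = mid
--         else:
--             lo = mid + 1
--     if lo == 0:
--         return "listing"
--     return NAMES[lo - 1]
-- ===== Notes on version B (the rewrite author's own statement) =====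
-- stated objective: alternative
-- what changed: Replaces A's descending linear scan of the SCALES table by a binary search (bisect_right by hand) over an ascending limits table with a parallel names table, keeping the falsiness guard.
import Mathlib
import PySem

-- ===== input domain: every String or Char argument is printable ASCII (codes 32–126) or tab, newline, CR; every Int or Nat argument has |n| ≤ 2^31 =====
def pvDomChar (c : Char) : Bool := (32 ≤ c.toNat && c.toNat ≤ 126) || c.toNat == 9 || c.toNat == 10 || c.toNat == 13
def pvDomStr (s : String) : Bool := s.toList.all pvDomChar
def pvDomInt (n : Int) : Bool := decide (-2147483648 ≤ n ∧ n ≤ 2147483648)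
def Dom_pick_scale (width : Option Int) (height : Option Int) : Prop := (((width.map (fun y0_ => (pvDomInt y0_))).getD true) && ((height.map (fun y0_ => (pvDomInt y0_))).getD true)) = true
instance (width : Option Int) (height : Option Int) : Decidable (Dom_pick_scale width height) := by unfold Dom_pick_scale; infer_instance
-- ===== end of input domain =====

-- B replaces A's descending linear scan of SCALES by a binary search over an ascending limits table (alternative algorithm, same result).


-- ===== PORT A =====
def SCALES : List (String × Int) :=
  [("large", 768), ("preview", 400), ("mini", 200), ("thumb", 128),
   ("tile", 64), ("icon", 32), ("listing", 16)]

-- A's for-loop with early return, as structural recursion over SCALES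
def pickLoopA (m : Int) : List (String × Int) → String
  | [] => "listing"
  | (name, limit) :: rest => if m ≥ limit then name else pickLoopA m rest

def pick_scale (width : Option Int) (height : Option Int) : String :=
  -- `not width or not height`: None or 0 is falsy
  match width, height with
  | some w, some h =>
    if w = 0 ∨ h = 0 then "preview"
    else pickLoopA (max w h) SCALES
  | _, _ => "preview"

-- ===== PORT B =====
def LIMITS : List Int := [16, 32, 64, 128, 200, 400, 768]
def NAMES : List String := ["listing", "icon", "tile", "thumb", "mini", "preview", "large"]

-- Source B's while-loop binary search (bisect_right), fuel = initial hi-lo bound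
def bisectGo (m : Int) : Nat → Nat → Nat → Nat
  | 0, lo, _ => lo
  | fuel + 1, lo, hi =>
    if lo < hi then
      let mid := (lo + hi) / 2
      if m < LIMITS.getD mid 0 then bisectGo m fuel lo mid
      else bisectGo m fuel (mid + 1) hi
    else lo

def pick_scale_alt (width : Option Int) (height : Option Int) : String :=
  match width with
  | none => "preview"
  | some w =>
    match height with
    | none => "preview"
    | some h =>
      if w = 0 ∨ h = 0 then "preview"
      else
        let lo := bisectGo (max w h) LIMITS.length 0 LIMITS.length
        if lo = 0 then "listing" else NAMES.getD (lo - 1) ""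

-- ===== PRECONDITION & SPEC =====
def Spec_pick_scale (width : Option Int) (height : Option Int) (out : String) : Prop := out = pick_scale_alt width height
instance (width : Option Int) (height : Option Int) (out : String) : Decidable (Spec_pick_scale width height out) := by unfold Spec_pick_scale; infer_instance

-- ===== CLAIM (what is proved, stated in full; the proofs are below) =====
def Claim_equal_pick_scale : Prop := ∀ (width : Option Int) (height : Option Int), Dom_pick_scale width height → Spec_pick_scale width height (pick_scale width height)

-- ===== LEMMAS AND PROOFS =====
-- one-step unfoldings of the binary search on the concrete table
lemma bg7 (m : Int) : bisectGo m 7 0 7 = if m < 128 then bisectGo m 6 0 3 else bisectGo m 6 4 7 := rfl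
lemma bg6a (m : Int) : bisectGo m 6 0 3 = if m < 32 then bisectGo m 5 0 1 else bisectGo m 5 2 3 := rfl
lemma bg6b (m : Int) : bisectGo m 6 4 7 = if m < 400 then bisectGo m 5 4 5 else bisectGo m 5 6 7 := rfl
lemma bg5a (m : Int) : bisectGo m 5 0 1 = if m < 16 then 0 else 1 := by
  rw [show bisectGo m 5 0 1 = if m < 16 then bisectGo m 4 0 0 else bisectGo m 4 1 1 from rfl,
      show bisectGo m 4 0 0 = 0 from rfl, show bisectGo m 4 1 1 = 1 from rfl]
lemma bg5b (m : Int) : bisectGo m 5 2 3 = if m < 64 then 2 else 3 := by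
  rw [show bisectGo m 5 2 3 = if m < 64 then bisectGo m 4 2 2 else bisectGo m 4 3 3 from rfl,
      show bisectGo m 4 2 2 = 2 from rfl, show bisectGo m 4 3 3 = 3 from rfl]
lemma bg5c (m : Int) : bisectGo m 5 4 5 = if m < 200 then 4 else 5 := by
  rw [show bisectGo m 5 4 5 = if m < 200 then bisectGo m 4 4 4 else bisectGo m 4 5 5 from rfl,
      show bisectGo m 4 4 4 = 4 from rfl, show bisectGo m 4 5 5 = 5 from rfl]
lemma bg5d (m : Int) : bisectGo m 5 6 7 = if m < 768 then 6 else 7 := by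
  rw [show bisectGo m 5 6 7 = if m < 768 then bisectGo m 4 6 6 else bisectGo m 4 7 7 from rfl,
      show bisectGo m 4 6 6 = 6 from rfl, show bisectGo m 4 7 7 = 7 from rfl]

lemma bis_char (m : Int) : bisectGo m 7 0 7 =
    if m < 16 then 0 else if m < 32 then 1 else if m < 64 then 2 else if m < 128 then 3
    else if m < 200 then 4 else if m < 400 then 5 else if m < 768 then 6 else 7 := by
  rw [bg7, bg6a, bg6b]
  simp only [bg5a, bg5b, bg5c, bg5d]
  split_ifs <;> omega

lemma loopA_char (m : Int) : pickLoopA m SCALES =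
    if m ≥ 768 then "large" else if m ≥ 400 then "preview" else if m ≥ 200 then "mini"
    else if m ≥ 128 then "thumb" else if m ≥ 64 then "tile" else if m ≥ 32 then "icon"
    else if m ≥ 16 then "listing" else "listing" := rfl

lemma pick_core_eq (m : Int) :
    pickLoopA m SCALES =
      (if bisectGo m 7 0 7 = 0 then "listing"
       else NAMES.getD (bisectGo m 7 0 7 - 1) "") := by
  rcases lt_or_ge m 16 with h0|h0
  · have hb : bisectGo m 7 0 7 = 0 := by rw [bis_char, if_pos h0]
    rw [hb, loopA_char, if_neg (not_le.mpr (lt_of_lt_of_le h0 (by decide : (16:Int) ≤ 768))), if_neg (not_le.mpr (lt_of_lt_of_le h0 (by decide : (16:Int) ≤ 400))), if_neg (not_le.mpr (lt_of_lt_of_le h0 (by decide : (16:Int) ≤ 200))), if_neg (not_le.mpr (lt_of_lt_of_le h0 (by decide : (16:Int) ≤ 128))), if_neg (not_le.mpr (lt_of_lt_of_le h0 (by decide : (16:Int) ≤ 64))), if_neg (not_le.mpr (lt_of_lt_of_le h0 (by decide : (16:Int) ≤ 32))), if_neg (not_le.mpr (lt_of_lt_of_le h0 (by decide : (16:Int)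 ≤ 16)))]
    rfl
  rcases lt_or_ge m 32 with h1|h1
  · have hb : bisectGo m 7 0 7 = 1 := by rw [bis_char, if_neg (not_lt.mpr h0), if_pos h1]
    rw [hb, loopA_char, if_neg (not_le.mpr (lt_of_lt_of_le h1 (by decide : (32:Int) ≤ 768))), if_neg (not_le.mpr (lt_of_lt_of_le h1 (by decide : (32:Int) ≤ 400))), if_neg (not_le.mpr (lt_of_lt_of_le h1 (by decide : (32:Int) ≤ 200))), if_neg (not_le.mpr (lt_of_lt_of_le h1 (by decide : (32:Int) ≤ 128))), if_neg (not_le.mpr (lt_of_lt_of_le h1 (by decide : (32:Int) ≤ 64))), if_neg (not_le.mpr (lt_of_lt_of_le h1 (by decide : (32:Int) ≤ 32))), if_pos h0]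
    rfl
  rcases lt_or_ge m 64 with h2|h2
  · have hb : bisectGo m 7 0 7 = 2 := by rw [bis_char, if_neg (not_lt.mpr h0), if_neg (not_lt.mpr h1), if_pos h2]
    rw [hb, loopA_char, if_neg (not_le.mpr (lt_of_lt_of_le h2 (by decide : (64:Int) ≤ 768))), if_neg (not_le.mpr (lt_of_lt_of_le h2 (by decide : (64:Int) ≤ 400))), if_neg (not_le.mpr (lt_of_lt_of_le h2 (by decide : (64:Int) ≤ 200))), if_neg (not_le.mpr (lt_of_lt_of_le h2 (by decide : (64:Int) ≤ 128))), if_neg (not_le.mpr (lt_of_lt_of_le h2 (by decide : (64:Int) ≤ 64))), if_pos h1]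
    rfl
  rcases lt_or_ge m 128 with h3|h3
  · have hb : bisectGo m 7 0 7 = 3 := by rw [bis_char, if_neg (not_lt.mpr h0), if_neg (not_lt.mpr h1), if_neg (not_lt.mpr h2), if_pos h3]
    rw [hb, loopA_char, if_neg (not_le.mpr (lt_of_lt_of_le h3 (by decide : (128:Int) ≤ 768))), if_neg (not_le.mpr (lt_of_lt_of_le h3 (by decide : (128:Int) ≤ 400))), if_neg (not_le.mpr (lt_of_lt_of_le h3 (by decide : (128:Int) ≤ 200))), if_neg (not_le.mpr (lt_of_lt_of_le h3 (by decide : (128:Int) ≤ 128))), if_pos h2]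
    rfl
  rcases lt_or_ge m 200 with h4|h4
  · have hb : bisectGo m 7 0 7 = 4 := by rw [bis_char, if_neg (not_lt.mpr h0), if_neg (not_lt.mpr h1), if_neg (not_lt.mpr h2), if_neg (not_lt.mpr h3), if_pos h4]
    rw [hb, loopA_char, if_neg (not_le.mpr (lt_of_lt_of_le h4 (by decide : (200:Int) ≤ 768))), if_neg (not_le.mpr (lt_of_lt_of_le h4 (by decide : (200:Int) ≤ 400))), if_neg (not_le.mpr (lt_of_lt_of_le h4 (by decide : (200:Int) ≤ 200))), if_pos h3]
    rfl
  rcases lt_or_ge m 400 with h5|h5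
  · have hb : bisectGo m 7 0 7 = 5 := by rw [bis_char, if_neg (not_lt.mpr h0), if_neg (not_lt.mpr h1), if_neg (not_lt.mpr h2), if_neg (not_lt.mpr h3), if_neg (not_lt.mpr h4), if_pos h5]
    rw [hb, loopA_char, if_neg (not_le.mpr (lt_of_lt_of_le h5 (by decide : (400:Int) ≤ 768))), if_neg (not_le.mpr (lt_of_lt_of_le h5 (by decide : (400:Int) ≤ 400))), if_pos h4]
    rfl
  rcases lt_or_ge m 768 with h6|h6
  · have hb : bisectGo m 7 0 7 = 6 := by rw [bis_char, if_neg (not_lt.mpr h0), if_neg (not_lt.mpr h1), if_neg (not_lt.mpr h2), if_neg (not_lt.mpr h3), if_neg (not_lt.mpr h4), if_neg (not_lt.mpr h5), if_pos h6]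
    rw [hb, loopA_char, if_neg (not_le.mpr (lt_of_lt_of_le h6 (by decide : (768:Int) ≤ 768))), if_pos h5]
    rfl
  · have hb : bisectGo m 7 0 7 = 7 := by rw [bis_char, if_neg (not_lt.mpr h0), if_neg (not_lt.mpr h1), if_neg (not_lt.mpr h2), if_neg (not_lt.mpr h3), if_neg (not_lt.mpr h4), if_neg (not_lt.mpr h5), if_neg (not_lt.mpr h6)]
    rw [hb, loopA_char, if_pos h6]
    rfl

-- ===== VERDICT (by name: the statement is the Claim_ definition above) =====
theorem pick_scale_spec : Claim_equal_pick_scale := by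
  intro width height _
  unfold Spec_pick_scale pick_scale pick_scale_alt
  cases width with
  | none => rfl
  | some w =>
    cases height with
    | none => rfl
    | some h =>
      by_cases hz : w = 0 ∨ h = 0
      · simp [hz]
      · simp only [if_neg hz]
        exact pick_core_eq (max w h)
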